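-- pv_equiv track=rewrite | github.com/aeon-blok/Data-Structures-in-Python | Maps/hash_table_with_chaining.py | _cyclic_polynomial_combo_hash_code
-- ===== SOURCE A (Python) =====
-- def _cyclic_polynomial_combo_hash_code(key, shift: int = 7):
--     prime_weighting = 33  # small prime number: commonly 33, 37, 39, 41 - we will randomize and initialize on hashtable creation
--     bit_mask = 2**64-1  # This creates a 64-bit mask
--     hash_code = 0
--     # horner's method = hash * prime + char(ascii number)
--     for character in key:
--         hash_code = hash_code * prime_weighting + ord(character) & bit_mask
--     hash_code ^= (hash_code << shift) & bit_mask
--     hash_code ^= (hash_code >> shift)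
--     hash_code ^= hash_code << (shift // 2) & bit_mask
--
--     return hash_code & bit_mask
-- ===== SOURCE B (Python) =====
-- def _cyclic_polynomial_combo_hash_code(key, shift: int = 7):
--     M = 1 << 64
--     n = len(key)
--     # direct polynomial evaluation: sum of ord(c) * 33^(n-1-i) with modular powers,
--     # reduced mod 2^64 once (reduction mod 2^64 commutes with + and *)
--     hash_code = sum(ord(c) * pow(33, n - 1 - i, M) for i, c in enumerate(key)) % M
--     # the same three xor-shift mixing stages, table-driven
--     for s, right in ((shift, False), (shift, True), (shift // 2, False)):
--         hash_code ^= (hash_code >> s) if right else (hash_code << s) % M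
--     return hash_code % M
-- ===== Notes on version B (the rewrite author's own statement) =====
-- stated objective: alternative
-- what changed: A's per-step-masked Horner fold is replaced by a direct polynomial sum over enumerate(key) using modular powers pow(33, n-1-i, 2**64) reduced once, and the three hand-written xor-shift mixing lines are replaced by one table-driven loop over (shift-amount, direction) stages using % 2**64 instead of &-masking; correct because reduction mod 2^64 commutes with + and * and masking a nonnegative value with 2**64-1 is % 2**64.
import Mathlib
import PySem

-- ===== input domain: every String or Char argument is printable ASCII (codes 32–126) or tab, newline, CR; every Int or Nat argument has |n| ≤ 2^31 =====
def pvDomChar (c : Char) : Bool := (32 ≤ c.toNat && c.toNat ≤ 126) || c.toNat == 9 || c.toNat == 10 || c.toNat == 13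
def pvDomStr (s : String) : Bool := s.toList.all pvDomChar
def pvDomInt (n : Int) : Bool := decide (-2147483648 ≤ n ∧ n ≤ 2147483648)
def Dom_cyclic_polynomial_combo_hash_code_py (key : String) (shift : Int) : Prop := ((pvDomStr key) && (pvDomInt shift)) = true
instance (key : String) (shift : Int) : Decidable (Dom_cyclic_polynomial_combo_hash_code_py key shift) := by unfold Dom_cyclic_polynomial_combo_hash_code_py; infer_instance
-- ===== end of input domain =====

-- B replaces A's per-step-masked Horner fold by a direct polynomial sum over enumerate(key)
-- with modular powers pow(33, n-1-i, 2^64), and replaces the three hand-written xor-shift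
-- lines by one table-driven mixing loop using % 2^64 instead of &-masking (alternative).

-- ===== PORT A =====
def cyclic_polynomial_combo_hash_code_py (key : String) (shift : Int) : Int :=
  let prime_weighting : Int := 33
  let bit_mask : Int := 2 ^ 64 - 1
  -- horner's method; `h * p + ord(c) & bit_mask` masks the whole sum (Python precedence)
  let hash_code : Int := key.toList.foldl
    (fun hash_code character =>
      PySem.Int.band (hash_code * prime_weighting + (character.toNat : Int)) bit_mask) 0
  -- Python `x << s` / `x >> s` = `x <<< s.toNat` / `x >>> s.toNat`: exact since Pre_ gives 0 ≤ shift
  let hash_code := PySem.Int.bxor hash_code (PySem.Int.band (hash_code <<< shift.toNat) bit_mask)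
  let hash_code := PySem.Int.bxor hash_code (hash_code >>> shift.toNat)
  let hash_code := PySem.Int.bxor hash_code
    (PySem.Int.band (hash_code <<< (PySem.Int.floordiv shift 2).toNat) bit_mask)
  PySem.Int.band hash_code bit_mask

-- ===== PORT B =====
def cyclic_polynomial_combo_hash_code_py_alt (key : String) (shift : Int) : Int :=
  let M : Int := 1 <<< 64
  let n : Int := key.toList.length
  -- sum(ord(c) * pow(33, n-1-i, M) for i, c in enumerate(key)) % M;
  -- the exponent n-1-i is ≥ 0 at every index i, so `.toNat` is exact
  let hash_code : Int :=
    ((PySem.List.enumerate key.toList).map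
      (fun ic => ((ic.2.toNat : Int)) * ((33 : Int) ^ (n - 1 - ic.1).toNat % M))).sum % M
  -- table-driven mixing stages (shift amounts exact for 0 ≤ shift, as in port A)
  let hash_code :=
    [(shift, false), (shift, true), (PySem.Int.floordiv shift 2, false)].foldl
      (fun h st => PySem.Int.bxor h (if st.2 then h >>> st.1.toNat else h <<< st.1.toNat % M))
      hash_code
  hash_code % M

-- ===== PRECONDITION & SPEC =====
-- Pre_ excludes negative shift, on which Python's `<<`/`>>` raise ValueError in A (and in B).
def Pre_cyclic_polynomial_combo_hash_code_py (key : String) (shift : Int) : Prop := 0 ≤ shift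
instance (key : String) (shift : Int) : Decidable (Pre_cyclic_polynomial_combo_hash_code_py key shift) := by unfold Pre_cyclic_polynomial_combo_hash_code_py; infer_instance
def pvWitness_cyclic_polynomial_combo_hash_code_py : String × Int := ("hello", 7)

def Spec_cyclic_polynomial_combo_hash_code_py (key : String) (shift : Int) (out : Int) : Prop := out = cyclic_polynomial_combo_hash_code_py_alt key shift
instance (key : String) (shift : Int) (out : Int) : Decidable (Spec_cyclic_polynomial_combo_hash_code_py key shift out) := by unfold Spec_cyclic_polynomial_combo_hash_code_py; infer_instance

-- ===== CLAIM (what is proved, stated in full; the proofs are below) =====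
def Claim_equal_cyclic_polynomial_combo_hash_code_py : Prop := ∀ (key : String) (shift : Int), Dom_cyclic_polynomial_combo_hash_code_py key shift → Pre_cyclic_polynomial_combo_hash_code_py key shift → Spec_cyclic_polynomial_combo_hash_code_py key shift (cyclic_polynomial_combo_hash_code_py key shift)

-- ===== LEMMAS AND PROOFS =====

-- character value, as both ports use it
def pvVal (c : Char) : Int := (c.toNat : Int)

-- the big-endian polynomial both ports compute before mixing
def pvPolyB : List Char → Int
  | [] => 0
  | c :: xs => pvVal c * 33 ^ xs.length + pvPolyB xs

-- masking a nonnegative int with 2^64-1 is reduction mod 2^64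
theorem pv_band_mask (x : Int) (hx : 0 ≤ x) :
    PySem.Int.band x (2 ^ 64 - 1) = x % 2 ^ 64 := by
  rw [PySem.Int.band_of_nonneg hx (by norm_num)]
  have h1 : ((2 ^ 64 - 1 : Int)).toNat = 2 ^ 64 - 1 := by rfl
  rw [h1, Nat.and_two_pow_sub_one_eq_mod]
  omega

-- A's per-step-masked Horner fold is the unmasked Horner fold, reduced mod 2^64 at the end
theorem pv_foldA_eq (xs : List Char) : ∀ (a : Int),
    xs.foldl (fun h c => PySem.Int.band (h * 33 + pvVal c) (2 ^ 64 - 1)) (a % 2 ^ 64)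
      = (xs.foldl (fun h c => h * 33 + pvVal c) a) % 2 ^ 64 := by
  induction xs with
  | nil => intro a; simp
  | cons c xs ih =>
    intro a
    have hnn : (0 : Int) ≤ a % 2 ^ 64 * 33 + pvVal c := by
      have := Int.emod_nonneg a (by norm_num : (2 ^ 64 : Int) ≠ 0)
      have : (0:Int) ≤ pvVal c := by simp [pvVal]
      positivity
    simp only [List.foldl_cons]
    rw [pv_band_mask _ hnn]
    have hmod : (a % 2 ^ 64 * 33 + pvVal c) % 2 ^ 64 = (a * 33 + pvVal c) % 2 ^ 64 := by
      conv_lhs => rw [Int.add_emod, Int.mul_emod, Int.emod_emod_of_dvd a dvd_rfl]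
      rw [← Int.mul_emod, ← Int.add_emod]
    rw [hmod, ih]

-- the unmasked Horner fold evaluates the big-endian polynomial
theorem pv_horner_eq (xs : List Char) : ∀ (a : Int),
    xs.foldl (fun h c => h * 33 + pvVal c) a = a * 33 ^ xs.length + pvPolyB xs := by
  induction xs with
  | nil => intro a; simp [pvPolyB]
  | cons c xs ih =>
    intro a
    simp only [List.foldl_cons, pvPolyB, List.length_cons]
    rw [ih]
    ring

-- B's enumerate-sum with modular powers is the big-endian polynomial, mod 2^64
theorem pv_sum_mod (xs : List Char) : ∀ (s n : Int), n = s + xs.length →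
    Int.ModEq (2 ^ 64)
      (((PySem.List.enumerate xs s).map
        (fun ic => pvVal ic.2 * ((33 : Int) ^ (n - 1 - ic.1).toNat % 2 ^ 64))).sum)
      (pvPolyB xs) := by
  induction xs with
  | nil => intro s n _; simp [PySem.List.enumerate_nil, pvPolyB]
  | cons c xs ih =>
    intro s n hn
    have hexp : (n - 1 - s).toNat = xs.length := by
      have : n - 1 - s = (xs.length : Int) := by simp [hn, List.length_cons]; ring
      rw [this]; exact Int.toNat_natCast _
    rw [PySem.List.enumerate_cons]
    simp only [List.map_cons, List.sum_cons, pvPolyB, hexp]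
    have h1 : Int.ModEq (2 ^ 64) (pvVal c * ((33:Int) ^ xs.length % 2 ^ 64))
        (pvVal c * 33 ^ xs.length) :=
      Int.ModEq.mul_left _ (Int.emod_emod_of_dvd _ dvd_rfl)
    exact h1.add (ih (s + 1) n (by rw [hn, List.length_cons]; push_cast; ring))

-- nonnegativity helpers for the mixing stage
theorem pv_shl_nonneg (h : Int) (k : Nat) (hh : 0 ≤ h) : 0 ≤ h <<< k := by
  rw [Int.shiftLeft_eq]; positivity

theorem pv_shr_nonneg (h : Int) (k : Nat) (hh : 0 ≤ h) : 0 ≤ h >>> k := by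
  rw [Int.shiftRight_eq_div_pow]; positivity

theorem pv_bxor_nonneg (a b : Int) (ha : 0 ≤ a) (hb : 0 ≤ b) : 0 ≤ PySem.Int.bxor a b := by
  rw [PySem.Int.bxor_of_nonneg ha hb]; positivity

-- the masked mixing pipeline (A) equals the mod-2^64 mixing pipeline (B) on nonnegative input
theorem pv_mix_eq (h : Int) (hh : 0 ≤ h) (k1 k2 k3 : Nat) :
    PySem.Int.band
      (PySem.Int.bxor
        (PySem.Int.bxor
          (PySem.Int.bxor h (PySem.Int.band (h <<< k1) (2 ^ 64 - 1)))
          ((PySem.Int.bxor h (PySem.Int.band (h <<< k1) (2 ^ 64 - 1))) >>> k2))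
        ((PySem.Int.bxor
          (PySem.Int.bxor h (PySem.Int.band (h <<< k1) (2 ^ 64 - 1)))
          ((PySem.Int.bxor h (PySem.Int.band (h <<< k1) (2 ^ 64 - 1))) >>> k2)) <<< k3
          |> (PySem.Int.band · (2 ^ 64 - 1))))
      (2 ^ 64 - 1)
    =
    (PySem.Int.bxor
      (PySem.Int.bxor
        (PySem.Int.bxor h (h <<< k1 % 2 ^ 64))
        ((PySem.Int.bxor h (h <<< k1 % 2 ^ 64)) >>> k2))
      ((PySem.Int.bxor
        (PySem.Int.bxor h (h <<< k1 % 2 ^ 64))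
        ((PySem.Int.bxor h (h <<< k1 % 2 ^ 64)) >>> k2)) <<< k3 % 2 ^ 64)) % 2 ^ 64 := by
  have e1 : PySem.Int.band (h <<< k1) (2 ^ 64 - 1) = h <<< k1 % 2 ^ 64 :=
    pv_band_mask _ (pv_shl_nonneg h k1 hh)
  have nn1 : 0 ≤ PySem.Int.bxor h (h <<< k1 % 2 ^ 64) :=
    pv_bxor_nonneg _ _ hh (Int.emod_nonneg _ (by norm_num))
  have nn2 : 0 ≤ PySem.Int.bxor (PySem.Int.bxor h (h <<< k1 % 2 ^ 64))
      ((PySem.Int.bxor h (h <<< k1 % 2 ^ 64)) >>> k2) :=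
    pv_bxor_nonneg _ _ nn1 (pv_shr_nonneg _ k2 nn1)
  simp only [e1]
  have e3 : PySem.Int.band ((PySem.Int.bxor (PySem.Int.bxor h (h <<< k1 % 2 ^ 64))
      ((PySem.Int.bxor h (h <<< k1 % 2 ^ 64)) >>> k2)) <<< k3) (2 ^ 64 - 1)
      = (PySem.Int.bxor (PySem.Int.bxor h (h <<< k1 % 2 ^ 64))
      ((PySem.Int.bxor h (h <<< k1 % 2 ^ 64)) >>> k2)) <<< k3 % 2 ^ 64 :=
    pv_band_mask _ (pv_shl_nonneg _ k3 nn2)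
  rw [e3]
  exact pv_band_mask _ (pv_bxor_nonneg _ _ nn2 (Int.emod_nonneg _ (by norm_num)))

-- ===== VERDICT (by name: the statement is the Claim_ definition above) =====
theorem cyclic_polynomial_combo_hash_code_py_spec : Claim_equal_cyclic_polynomial_combo_hash_code_py := by
  intro key shift _ _
  unfold Spec_cyclic_polynomial_combo_hash_code_py
  unfold cyclic_polynomial_combo_hash_code_py cyclic_polynomial_combo_hash_code_py_alt
  simp only [List.foldl_cons, List.foldl_nil, if_true, if_false, Bool.false_eq_true]
  have hM : (1 <<< 64 : Int) = 2 ^ 64 := by decide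
  rw [hM]
  -- pre-mixing values coincide
  have hpre :
      key.toList.foldl
        (fun h c => PySem.Int.band (h * 33 + (c.toNat : Int)) (2 ^ 64 - 1)) 0
      = ((PySem.List.enumerate key.toList).map
          (fun ic => ((ic.2.toNat : Int)) *
            ((33 : Int) ^ (((key.toList.length : Int)) - 1 - ic.1).toNat % 2 ^ 64))).sum
          % 2 ^ 64 := by
    have hA' : key.toList.foldl
        (fun h c => PySem.Int.band (h * 33 + (c.toNat : Int)) (2 ^ 64 - 1)) 0
        = pvPolyB key.toList % 2 ^ 64 := by
      rw [show (fun (h : Int) (c : Char) => PySem.Int.band (h * 33 + (c.toNat : Int)) (2 ^ 64 - 1))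
            = (fun h c => PySem.Int.band (h * 33 + pvVal c) (2 ^ 64 - 1)) from rfl]
      conv_lhs => rw [show (0 : Int) = 0 % 2 ^ 64 from by norm_num]
      rw [pv_foldA_eq key.toList 0, pv_horner_eq key.toList 0]
      norm_num
    have hB := pv_sum_mod key.toList 0 (key.toList.length : Int) (by simp)
    unfold Int.ModEq at hB
    rw [hA']
    rw [show (fun (ic : Int × Char) => ((ic.2.toNat : Int)) *
          ((33 : Int) ^ (((key.toList.length : Int)) - 1 - ic.1).toNat % 2 ^ 64))
        = (fun ic => pvVal ic.2 *
          ((33 : Int) ^ (((key.toList.length : Int)) - 1 - ic.1).toNat % 2 ^ 64)) from rfl]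
    exact hB.symm
  rw [← hpre]
  set h0 := key.toList.foldl
      (fun h c => PySem.Int.band (h * 33 + (c.toNat : Int)) (2 ^ 64 - 1)) 0 with hh0
  have hnn : 0 ≤ h0 := by
    rw [hh0, show (0:Int) = 0 % 2 ^ 64 from rfl,
      show (fun (h : Int) (c : Char) => PySem.Int.band (h * 33 + (c.toNat : Int)) (2 ^ 64 - 1))
        = (fun h c => PySem.Int.band (h * 33 + pvVal c) (2 ^ 64 - 1)) from rfl,
      pv_foldA_eq key.toList 0]
    exact Int.emod_nonneg _ (by norm_num)
  simpa using pv_mix_eq h0 hnn shift.toNat shift.toNat (PySem.Int.floordiv shift 2).toNat
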